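-- pv_equiv track=rewrite | github.com/andtarov/test_tasks | task_5.py | palindroms
-- ===== SOURCE A (Python) =====
-- def palindroms(length):
-- 	count = []
-- 	for num in range(length+1):
-- 		if len(str(num))>1:
-- 			dig_1 = num // 10
-- 			dig_2 = num % 10
-- 			if dig_1 == dig_2:
-- 				count.append(num)
-- 	return count
-- ===== SOURCE B (Python) =====
-- def palindroms(length):
--     top = min(9, length // 11)
--     return [11 * k for k in range(1, top + 1)]
-- ===== Notes on version B (the rewrite author's own statement) =====
-- stated objective: faster
-- what changed: B emits the qualifying two-digit repdigit numbers directly in closed form from the length bound instead of scanning every number up to length and testing its digits.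
import Mathlib
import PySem

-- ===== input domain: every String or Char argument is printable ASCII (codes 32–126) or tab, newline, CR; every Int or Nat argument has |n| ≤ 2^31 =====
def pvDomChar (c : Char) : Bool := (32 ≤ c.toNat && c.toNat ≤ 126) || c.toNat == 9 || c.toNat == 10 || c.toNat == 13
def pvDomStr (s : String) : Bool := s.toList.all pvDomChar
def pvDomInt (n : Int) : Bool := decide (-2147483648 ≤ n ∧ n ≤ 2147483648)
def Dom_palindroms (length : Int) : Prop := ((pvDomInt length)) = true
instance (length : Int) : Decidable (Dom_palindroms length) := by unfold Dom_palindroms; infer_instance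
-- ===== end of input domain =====

-- B replaces A's linear scan with a closed-form emission of the multiples of 11 up to min(99, length); objective: faster (asymptotic).

-- ===== PORT A =====
def palindroms (length : Int) : List Int :=
  (PySem.List.pyRange 0 (length + 1) 1).foldl
    (fun count num =>
      if 1 < PySem.Str.len (PySem.Int.toStr num) then
        let dig_1 := PySem.Int.floordiv num 10
        let dig_2 := PySem.Int.mod num 10
        if dig_1 = dig_2 then count ++ [num] else count
      else count) []

-- ===== PORT B =====
def palindroms_alt (length : Int) : List Int :=
  (PySem.List.pyRange 1 (min 9 (PySem.Int.floordiv length 11) + 1) 1).map (fun k => 11 * k)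

-- ===== PRECONDITION & SPEC =====
def Spec_palindroms (length : Int) (out : List Int) : Prop := out = palindroms_alt length
instance (length : Int) (out : List Int) : Decidable (Spec_palindroms length out) := by unfold Spec_palindroms; infer_instance

-- ===== CLAIM (what is proved, stated in full; the proofs are below) =====
def Claim_equal_palindroms : Prop := ∀ (length : Int), Dom_palindroms length → Spec_palindroms length (palindroms length)

-- ===== LEMMAS AND PROOFS =====

-- the loop's test as a Bool predicate
def pvPb (num : Int) : Bool :=
  decide (1 < PySem.Str.len (PySem.Int.toStr num)) &&
  decide (PySem.Int.floordiv num 10 = PySem.Int.mod num 10)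

lemma pv_foldl_filter (l : List Int) (acc : List Int) :
    l.foldl
      (fun count num =>
        if 1 < PySem.Str.len (PySem.Int.toStr num) then
          let dig_1 := PySem.Int.floordiv num 10
          let dig_2 := PySem.Int.mod num 10
          if dig_1 = dig_2 then count ++ [num] else count
        else count) acc = acc ++ l.filter pvPb := by
  induction l generalizing acc with
  | nil => simp
  | cons x xs ih =>
      rw [List.foldl_cons, List.filter_cons]
      by_cases h1 : 1 < PySem.Str.len (PySem.Int.toStr x)
      · rw [if_pos h1]
        by_cases h2 : PySem.Int.floordiv x 10 = PySem.Int.mod x 10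
        · have hp : pvPb x = true := by
            simp only [pvPb]; rw [decide_eq_true h1, decide_eq_true h2]; rfl
          rw [if_pos h2, ih, hp]
          simp
        · have hp : pvPb x = false := by
            simp only [pvPb]; rw [decide_eq_false h2]; simp
          rw [if_neg h2, ih, hp]
          simp
      · have hp : pvPb x = false := by
          simp only [pvPb]; rw [decide_eq_false h1]; simp
        rw [if_neg h1, ih, hp]
        simp

set_option maxRecDepth 40000 in
lemma pv_pb_small : ∀ k ∈ List.range 111,
    pvPb (k : Int) = decide (11 ∣ (k : Int) ∧ 11 ≤ (k : Int) ∧ (k : Int) ≤ 99) := by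
  decide

lemma pv_pb_iff (n : Int) (h : 0 ≤ n) :
    pvPb n = true ↔ (11 ∣ n ∧ 11 ≤ n ∧ n ≤ 99) := by
  by_cases hbig : n ≤ 110
  · have hk : n = ((n.toNat : Nat) : Int) := by omega
    have hm : n.toNat ∈ List.range 111 := by
      simp [List.mem_range]; omega
    rw [hk, pv_pb_small n.toNat hm]
    simp
  · constructor
    · intro hp
      exfalso
      have h2 : PySem.Int.floordiv n 10 = PySem.Int.mod n 10 := by
        have := (Bool.and_eq_true _ _).mp hp
        exact of_decide_eq_true this.2
      rw [PySem.Int.floordiv_eq_ediv_of_pos (by norm_num),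
          PySem.Int.mod_eq_emod_of_pos (by norm_num)] at h2
      omega
    · intro ⟨_, _, h99⟩; omega

lemma pv_key (n : Nat) :
    (PySem.List.pyRange 0 (n : Int) 1).filter pvPb
      = (PySem.List.pyRange 1 (min 9 (PySem.Int.floordiv ((n : Int) - 1) 11) + 1) 1).map
          (fun k => 11 * k) := by
  induction n with
  | zero =>
      rw [PySem.List.pyRange_one_eq_nil (by norm_num)]
      rw [PySem.List.pyRange_one_eq_nil]
      · simp
      · rw [PySem.Int.floordiv_eq_ediv_of_pos (by norm_num)]
        norm_num
  | succ n ih =>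
      have hc : ((n + 1 : Nat) : Int) = (n : Int) + 1 := by push_cast; ring
      rw [hc, PySem.List.pyRange_one_succ_right (by positivity), List.filter_append, ih]
      have hfd : ∀ m : Int, PySem.Int.floordiv m 11 = m / 11 :=
        fun m => PySem.Int.floordiv_eq_ediv_of_pos (by norm_num)
      simp only [hfd]
      have hsimp : ((n : Int) + 1 - 1) = (n : Int) := by ring
      rw [hsimp]
      by_cases hp : pvPb (n : Int) = true
      · -- n is one of 11,22,…,99
        obtain ⟨hdvd, h11, h99⟩ := (pv_pb_iff (n : Int) (by positivity)).mp hp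
        obtain ⟨k, hk⟩ := hdvd
        have hmins : min 9 ((n : Int) / 11) = k := by omega
        have hmins' : min 9 (((n : Int) - 1) / 11) = k - 1 := by omega
        rw [hmins, hmins']
        rw [PySem.List.pyRange_one_succ_right (a := 1) (b := k) (by omega)]
        have hfil : List.filter pvPb [(n : Int)] = [(n : Int)] := by
          rw [List.filter_cons, hp]; simp
        rw [hfil, List.map_append]
        simp [hk]
      · -- n contributes nothing and the bound does not move (or the range stays empty)
        have hnp : ¬ (11 ∣ (n : Int) ∧ 11 ≤ (n : Int) ∧ (n : Int) ≤ 99) := by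
          intro h; exact hp ((pv_pb_iff (n : Int) (by positivity)).mpr h)
        simp only [List.filter_cons, hp]
        by_cases hz : n = 0
        · subst hz
          rw [PySem.List.pyRange_one_eq_nil (by decide),
              PySem.List.pyRange_one_eq_nil (by decide)]
          simp
        · have hdvd : ¬ 11 ∣ (n : Int) ∨ 99 < (n : Int) := by
            by_cases hd : 11 ∣ (n : Int)
            · right
              by_contra hle
              exact hnp ⟨hd, by omega, by omega⟩
            · left; exact hd
          have hmeq : min 9 ((n : Int) / 11) = min 9 (((n : Int) - 1) / 11) := by
            rcases hdvd with hd | hd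
            · rw [Int.dvd_iff_emod_eq_zero] at hd
              omega
            · omega
          rw [hmeq]; simp

-- ===== VERDICT (by name: the statement is the Claim_ definition above) =====
theorem palindroms_spec : Claim_equal_palindroms := by
  intro length _
  show palindroms length = palindroms_alt length
  unfold palindroms palindroms_alt
  rw [pv_foldl_filter, List.nil_append]
  by_cases hneg : length + 1 ≤ 0
  · rw [PySem.List.pyRange_one_eq_nil (by omega)]
    rw [PySem.List.pyRange_one_eq_nil]
    · simp
    · have : PySem.Int.floordiv length 11 < 0 := by
        rw [PySem.Int.floordiv_eq_ediv_of_pos (by norm_num)]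
        omega
      omega
  · have h0 : (0 : Int) ≤ length + 1 := by omega
    have hcast : length + 1 = (((length + 1).toNat : Nat) : Int) := by omega
    rw [hcast, pv_key]
    have : (((length + 1).toNat : Nat) : Int) - 1 = length := by omega
    rw [this]
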